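-- pv_equiv track=rewrite | github.com/xiangzz159/quantitative | test/WAVE_test.py | wave_guess
-- ===== SOURCE A (Python) =====
-- import heapq
--
-- def wave_guess(arr, wn):
--     # 计算最大的N个值，认为是波峰
--     wave_crest = heapq.nlargest(wn, enumerate(arr), key=lambda x: x[1])
--
--     # 计算最小的N个值，认为是波谷
--     wave_base = heapq.nsmallest(wn, enumerate(arr), key=lambda x: x[1])
--
--     wave_crest_x = []  # 波峰x
--     wave_crest_y = []  # 波峰y
--     for i, j in wave_crest:
--         wave_crest_x.append(i)
--         wave_crest_y.append(j)
--
--     wave_base_x = []  # 波谷x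
--     wave_base_y = []  # 波谷y
--     for i, j in wave_base:
--         wave_base_x.append(i)
--         wave_base_y.append(j)
--
--     return wave_crest_x, wave_base_x
-- ===== SOURCE B (Python) =====
-- def wave_guess(arr, wn):
--     # sort-then-slice instead of heap selection; extract indices directly
--     n = max(wn, 0)
--     crest_x = [i for i, _ in sorted(enumerate(arr), key=lambda p: (-p[1], p[0]))[:n]]
--     base_x = [i for i, _ in sorted(enumerate(arr), key=lambda p: (p[1], p[0]))[:n]]
--     return crest_x, base_x
-- ===== Notes on version B (the rewrite author's own statement) =====
-- stated objective: simpler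
-- what changed: Replaces heapq.nlargest/nsmallest partial selection plus explicit x/y extraction loops by two stable sorts of enumerate(arr) under explicit (value, index) tuple keys, sliced and reduced to indices in one comprehension each; the unused y-lists disappear.
import Mathlib
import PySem

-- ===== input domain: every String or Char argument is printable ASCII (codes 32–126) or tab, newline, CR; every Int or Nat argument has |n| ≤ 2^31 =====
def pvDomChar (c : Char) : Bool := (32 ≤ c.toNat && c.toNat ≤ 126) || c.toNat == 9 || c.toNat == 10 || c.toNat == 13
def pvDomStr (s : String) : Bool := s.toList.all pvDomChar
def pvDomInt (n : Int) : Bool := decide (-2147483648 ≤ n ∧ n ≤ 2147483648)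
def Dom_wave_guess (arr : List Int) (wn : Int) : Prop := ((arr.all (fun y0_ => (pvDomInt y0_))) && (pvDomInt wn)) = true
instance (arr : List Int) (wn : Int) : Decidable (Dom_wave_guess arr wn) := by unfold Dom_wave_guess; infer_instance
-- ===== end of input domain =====

-- B replaces heapq partial selection + extraction loops by two stable tuple-key sorts of enumerate(arr), sliced to indices (simpler, same result).


-- ===== PORT A =====
-- heapq.nlargest(n, it, key) / nsmallest are ported by their documented equivalents
-- sorted(it, key=key, reverse=True)[:n] / sorted(it, key=key)[:n]; n < 0 gives [] (Int.toNat 0).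
def wave_guess (arr : List Int) (wn : Int) : List Int × List Int :=
  let wave_crest := (PySem.List.sorted (PySem.List.enumerate arr) (fun p => p.2) true).take wn.toNat
  let wave_base := (PySem.List.sorted (PySem.List.enumerate arr) (fun p => p.2) false).take wn.toNat
  let cxy := wave_crest.foldl (fun acc p => (acc.1 ++ [p.1], acc.2 ++ [p.2])) ([], [])
  let bxy := wave_base.foldl (fun acc p => (acc.1 ++ [p.1], acc.2 ++ [p.2])) ([], [])
  (cxy.1, bxy.1)

-- ===== PORT B =====
-- Source B: n = max(wn, 0); the slice [:n] with 0 ≤ n is List.take n.toNat (exact).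
def wave_guess_alt (arr : List Int) (wn : Int) : List Int × List Int :=
  let n : Nat := (max wn 0).toNat
  let crest_x := ((PySem.List.sorted2 (PySem.List.enumerate arr) (fun p => -p.2) (fun p => p.1)).take n).map Prod.fst
  let base_x := ((PySem.List.sorted2 (PySem.List.enumerate arr) (fun p => p.2) (fun p => p.1)).take n).map Prod.fst
  (crest_x, base_x)

-- ===== PRECONDITION & SPEC =====
def Spec_wave_guess (arr : List Int) (wn : Int) (out : List Int × List Int) : Prop := out = wave_guess_alt arr wn
instance (arr : List Int) (wn : Int) (out : List Int × List Int) : Decidable (Spec_wave_guess arr wn out) := by unfold Spec_wave_guess; infer_instance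

-- ===== CLAIM (what is proved, stated in full; the proofs are below) =====
def Claim_equal_wave_guess : Prop := ∀ (arr : List Int) (wn : Int), Dom_wave_guess arr wn → Spec_wave_guess arr wn (wave_guess arr wn)

-- ===== LEMMAS AND PROOFS =====

-- insertBy only compares the new element x against list members: pointwise-equal predicates insert alike.
lemma insertBy_congr {α : Type} (b1 b2 : α → α → Bool) (x : α) :
    ∀ (ys : List α), (∀ y ∈ ys, b1 x y = b2 x y) →
      PySem.List.insertBy b1 x ys = PySem.List.insertBy b2 x ys := by
  intro ys
  induction ys with
  | nil => intro _; rfl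
  | cons y t ih =>
    intro h
    simp only [PySem.List.insertBy, h y (by simp)]
    split
    · rfl
    · simp [ih (fun z hz => h z (by simp [hz]))]

-- Two insertion sorts whose predicates agree whenever the inserted element has a larger f-tag
-- coincide, provided f strictly increases along the input (stability never gets exercised differently).
lemma foldl_insertBy_congr {α : Type} (f : α → Int) (b1 b2 : α → α → Bool)
    (hb : ∀ x y, f y < f x → b1 x y = b2 x y) :
    ∀ (xs acc : List α), (∀ y ∈ acc, ∀ x ∈ xs, f y < f x) →
      List.Pairwise (fun a c => f a < f c) xs →
      xs.foldl (fun a x => PySem.List.insertBy b1 x a) acc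
        = xs.foldl (fun a x => PySem.List.insertBy b2 x a) acc := by
  intro xs
  induction xs with
  | nil => intro _ _ _; rfl
  | cons x t ih =>
    intro acc hacc hp
    have h1 : PySem.List.insertBy b1 x acc = PySem.List.insertBy b2 x acc :=
      insertBy_congr b1 b2 x acc (fun y hy => hb x y (hacc y hy x (by simp)))
    simp only [List.foldl_cons, h1]
    apply ih
    · intro y hy x' hx'
      rcases (PySem.List.mem_insertBy _ _ _ _).1 hy with h | h
      · subst h; exact (List.pairwise_cons.1 hp).1 x' hx'
      · exact hacc y h x' (by simp [hx'])
    · exact (List.pairwise_cons.1 hp).2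

lemma enumerate_fst_ge {α : Type} :
    ∀ (xs : List α) (s : Int) (p : Int × α), p ∈ PySem.List.enumerate xs s → s ≤ p.1 := by
  intro xs
  induction xs with
  | nil => intro s p h; simp [PySem.List.enumerate] at h
  | cons x t ih =>
    intro s p h
    simp only [PySem.List.enumerate, List.mem_cons] at h
    rcases h with h | h
    · subst h; simp
    · have := ih (s + 1) p h; omega

lemma enumerate_pairwise {α : Type} :
    ∀ (xs : List α) (s : Int),
      List.Pairwise (fun a c => a.1 < c.1) (PySem.List.enumerate xs s) := by
  intro xs
  induction xs with
  | nil => intro s; simp [PySem.List.enumerate]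
  | cons x t ih =>
    intro s
    simp only [PySem.List.enumerate, List.pairwise_cons]
    refine ⟨fun p hp => ?_, ih (s + 1)⟩
    have := enumerate_fst_ge t (s + 1) p hp
    omega

-- stable descending value sort of enumerate = ascending sort under the (-value, index) tuple key
lemma crest_sort_eq (arr : List Int) :
    PySem.List.sorted (PySem.List.enumerate arr) (fun p => p.2) true
      = PySem.List.sorted2 (PySem.List.enumerate arr) (fun p => -p.2) (fun p => p.1) := by
  rw [PySem.List.sorted_rev_eq_foldl_insertBy]
  show _ = List.foldl (fun a x => PySem.List.insertBy _ x a) [] _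
  apply foldl_insertBy_congr (fun p => p.1)
  · intro x y hlt
    by_cases h : y.2 < x.2 <;> simp [h] <;> omega
  · intro y hy x _; simp at hy
  · exact enumerate_pairwise arr 0

-- stable ascending value sort of enumerate = ascending sort under the (value, index) tuple key
lemma base_sort_eq (arr : List Int) :
    PySem.List.sorted (PySem.List.enumerate arr) (fun p => p.2) false
      = PySem.List.sorted2 (PySem.List.enumerate arr) (fun p => p.2) (fun p => p.1) := by
  rw [PySem.List.sorted_eq_foldl_insertBy]
  show _ = List.foldl (fun a x => PySem.List.insertBy _ x a) [] _
  apply foldl_insertBy_congr (fun p => p.1)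
  · intro x y hlt
    by_cases h : x.2 < y.2 <;> simp [h] <;> omega
  · intro y hy x _; simp at hy
  · exact enumerate_pairwise arr 0

-- ===== VERDICT (by name: the statement is the Claim_ definition above) =====
theorem wave_guess_spec : Claim_equal_wave_guess := by
  intro arr wn _
  unfold Spec_wave_guess wave_guess wave_guess_alt
  dsimp only
  have hn : wn.toNat = (max wn 0).toNat := by omega
  rw [PySem.List.foldl_prod_mk (f := fun a (e : Int × Int) => a ++ [e.1])
        (g := fun a (e : Int × Int) => a ++ [e.2]),
      PySem.List.foldl_prod_mk (f := fun a (e : Int × Int) => a ++ [e.1])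
        (g := fun a (e : Int × Int) => a ++ [e.2])]
  simp only [PySem.List.foldl_append_singleton_eq_map, List.nil_append,
    crest_sort_eq, base_sort_eq, hn]
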